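-- pv_equiv track=rewrite | github.com/Rose-Lin/340_group_pj | data/haverford/scheduling.py | get_students_in_class
-- ===== SOURCE A (Python) =====
-- def get_students_in_class(pref_dict, room_dict):
--     students = {}
--     for s in pref_dict:
--         times = []
--         for c in pref_dict[s]:
--             if c in room_dict.keys():
--                 if room_dict[c][0] not in times:
--                     times.append(room_dict[c][0])
--                     if c in students:
--                         students[c].append(s)
--                     else:
--                         students[c] = [s]
--     return students
-- ===== SOURCE B (Python) =====
-- def get_students_in_class(pref_dict, room_dict):
--     students = {}
--     for s in pref_dict:
--         prefs = pref_dict[s]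
--         for i, c in enumerate(prefs):
--             if c in room_dict and all(
--                 p not in room_dict or room_dict[p][0] != room_dict[c][0]
--                 for p in prefs[:i]
--             ):
--                 if c in students:
--                     students[c].append(s)
--                 else:
--                     students[c] = [s]
--     return students
-- ===== Notes on version B (the rewrite author's own statement) =====
-- stated objective: alternative
-- what changed: B drops A's mutable 'times' seen-slot accumulator entirely: for each preference at index i it decides membership statelessly by scanning the prefix prefs[:i] with all(), choosing c iff no earlier in-room preference occupies the same time slot (quadratic look-back instead of A's accumulator scan).
import Mathlib
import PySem

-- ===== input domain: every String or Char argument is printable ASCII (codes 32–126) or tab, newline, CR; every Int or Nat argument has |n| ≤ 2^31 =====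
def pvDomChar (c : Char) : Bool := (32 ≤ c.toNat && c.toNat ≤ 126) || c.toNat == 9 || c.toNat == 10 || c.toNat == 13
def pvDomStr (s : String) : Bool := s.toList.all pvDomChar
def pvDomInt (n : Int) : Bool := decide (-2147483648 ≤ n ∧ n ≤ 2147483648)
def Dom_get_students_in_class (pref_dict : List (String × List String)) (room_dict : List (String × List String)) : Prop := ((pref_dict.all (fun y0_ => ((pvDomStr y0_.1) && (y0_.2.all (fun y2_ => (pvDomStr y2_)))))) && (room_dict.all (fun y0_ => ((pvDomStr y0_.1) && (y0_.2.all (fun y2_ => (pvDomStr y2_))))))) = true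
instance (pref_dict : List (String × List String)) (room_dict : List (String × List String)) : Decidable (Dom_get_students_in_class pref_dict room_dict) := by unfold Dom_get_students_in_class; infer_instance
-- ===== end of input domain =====

-- B removes A's mutable 'times' seen-slot accumulator: each preference at index i is chosen by a
-- stateless look-back over the prefix prefs[:i] (no earlier in-room preference with the same slot).

-- shared subexpressions of both Pythons: room_dict[c] (first match) and room_dict[c][0]
def pvRoomGet (room_dict : List (String × List String)) (c : String) : List String :=
  ((room_dict.find? (fun p => p.1 == c)).map Prod.snd).getD []
def pvRoomTime (room_dict : List (String × List String)) (c : String) : String :=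
  (PySem.List.pyGet? (pvRoomGet room_dict c) 0).getD ""   -- none (IndexError) excluded by Pre_
-- the identical dict-update code both Pythons contain ('if c in students: append else new')
def pvAdd (s c : String) (d : PySem.Dict String (List String)) : PySem.Dict String (List String) :=
  if d.contains c then d.insert c (d.getD c [] ++ [s]) else d.insert c [s]

-- ===== PORT A =====
-- A's inner-loop body: state = (students, times)
def pvAStep (room_dict : List (String × List String)) (s : String)
    (st : PySem.Dict String (List String) × List String) (c : String) :
    PySem.Dict String (List String) × List String :=
  if (room_dict.map Prod.fst).contains c then
    let t := pvRoomTime room_dict c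
    if st.2.contains t then st
    else (pvAdd s c st.1, st.2 ++ [t])
  else st

def get_students_in_class (pref_dict : List (String × List String)) (room_dict : List (String × List String)) : List (String × List String) :=
  (pref_dict.foldl (fun (students : PySem.Dict String (List String)) sp =>
      (sp.2.foldl (pvAStep room_dict sp.1) (students, ([] : List String))).1)
    PySem.Dict.empty).items

-- ===== PORT B =====
-- B's inner-loop body over enumerate(prefs): stateless guard scanning prefs[:i]
def pvBStep (room_dict : List (String × List String)) (s : String) (prefs : List String)
    (students : PySem.Dict String (List String)) (ic : Int × String) :
    PySem.Dict String (List String) :=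
  if (room_dict.map Prod.fst).contains ic.2 &&
     (PySem.List.slice prefs none (some ic.1)).all (fun p =>
        !(room_dict.map Prod.fst).contains p || pvRoomTime room_dict p != pvRoomTime room_dict ic.2) then
    pvAdd s ic.2 students
  else students

def get_students_in_class_alt (pref_dict : List (String × List String)) (room_dict : List (String × List String)) : List (String × List String) :=
  (pref_dict.foldl (fun (students : PySem.Dict String (List String)) sp =>
      (PySem.List.enumerate sp.2 0).foldl (pvBStep room_dict sp.1 sp.2) students)
    PySem.Dict.empty).items

-- ===== PRECONDITION & SPEC =====
-- Pre_ excludes (a) association lists with duplicate keys, where the Python dict arguments have no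
-- faithful list counterpart (later duplicates would overwrite), and (b) inputs where some preferred
-- class has an empty room list, on which A raises IndexError at room_dict[c][0].
def Pre_get_students_in_class (pref_dict : List (String × List String)) (room_dict : List (String × List String)) : Prop :=
  (pref_dict.map Prod.fst).Nodup ∧ (room_dict.map Prod.fst).Nodup ∧
  ∀ p ∈ pref_dict, ∀ c ∈ p.2, ∀ q ∈ room_dict, q.1 = c → q.2 ≠ []
instance (pref_dict : List (String × List String)) (room_dict : List (String × List String)) : Decidable (Pre_get_students_in_class pref_dict room_dict) := by unfold Pre_get_students_in_class; infer_instance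
def pvWitness_get_students_in_class : (List (String × List String)) × (List (String × List String)) :=
  ([("s", ["a", "b"])], [("a", ["9am"]), ("b", ["9am", "r2"])])

def Spec_get_students_in_class (pref_dict : List (String × List String)) (room_dict : List (String × List String)) (out : List (String × List String)) : Prop := out = get_students_in_class_alt pref_dict room_dict
instance (pref_dict : List (String × List String)) (room_dict : List (String × List String)) (out : List (String × List String)) : Decidable (Spec_get_students_in_class pref_dict room_dict out) := by unfold Spec_get_students_in_class; infer_instance

-- ===== CLAIM =====
def Claim_equal_get_students_in_class : Prop := ∀ (pref_dict : List (String × List String)) (room_dict : List (String × List String)), Dom_get_students_in_class pref_dict room_dict → Pre_get_students_in_class pref_dict room_dict → Spec_get_students_in_class pref_dict room_dict (get_students_in_class pref_dict room_dict)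

-- ===== LEMMAS AND PROOFS =====

-- Invariant relating A's 'times' accumulator to the processed prefix 'pre': t has been seen
-- exactly when some in-room class of the prefix occupies slot t.  Under it, A's stateful fold
-- over the remaining classes equals B's stateless fold over their enumeration.
theorem pv_inner_eq (room_dict : List (String × List String)) (s : String) :
    ∀ (cs pre : List String) (d : PySem.Dict String (List String)) (times : List String),
    (∀ t, times.contains t = true ↔
        ∃ p ∈ pre, (room_dict.map Prod.fst).contains p = true ∧ pvRoomTime room_dict p = t) →
    (cs.foldl (pvAStep room_dict s) (d, times)).1
      = (PySem.List.enumerate cs (pre.length : Int)).foldl (pvBStep room_dict s (pre ++ cs)) d := by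
  intro cs
  induction cs with
  | nil => intro pre d times _; simp [PySem.List.enumerate_nil]
  | cons c cs ih =>
    intro pre d times hinv
    have hpp : (pre ++ [c]) ++ cs = pre ++ c :: cs := by simp
    have hlen : ((pre ++ [c]).length : Int) = (pre.length : Int) + 1 := by simp
    have hslice : PySem.List.slice (pre ++ c :: cs) none (some (pre.length : Int)) = pre := by
      rw [PySem.List.slice_to_natCast]; simp
    rw [PySem.List.enumerate_cons, List.foldl_cons, List.foldl_cons]
    by_cases hc : (room_dict.map Prod.fst).contains c = true
    · by_cases ht : times.contains (pvRoomTime room_dict c) = true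
      · -- slot already seen: both skip
        obtain ⟨p, hp, hpin, hpt⟩ := (hinv _).mp ht
        have hall : (PySem.List.slice (pre ++ c :: cs) none (some (pre.length : Int))).all
            (fun p => !(room_dict.map Prod.fst).contains p ||
              pvRoomTime room_dict p != pvRoomTime room_dict c) = false := by
          rw [hslice]
          refine List.all_eq_false.mpr ⟨p, hp, ?_⟩
          simp only [hpin, Bool.not_true, hpt, bne_self_eq_false, Bool.or_false,
            Bool.false_eq_true, not_false_eq_true]
        have hA : pvAStep room_dict s (d, times) c = (d, times) := by
          simp only [pvAStep, hc, ht, if_true]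
        have hB : pvBStep room_dict s (pre ++ c :: cs) d ((pre.length : Int), c) = d := by
          simp only [pvBStep, hall, Bool.and_false, if_false, Bool.false_eq_true]
        rw [hA, hB]
        have := ih (pre ++ [c]) d times (by
          intro t
          rw [hinv t]
          constructor
          · rintro ⟨q, hq, h1, h2⟩; exact ⟨q, by simp [hq], h1, h2⟩
          · rintro ⟨q, hq, h1, h2⟩
            rcases (List.mem_append.mp hq) with h | h
            · exact ⟨q, h, h1, h2⟩
            · simp at h; subst h; exact ⟨p, hp, hpin, by rw [hpt, h2]⟩)
        rw [hpp, hlen] at this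
        exact this
      · -- new slot: both add the student
        have hall : (PySem.List.slice (pre ++ c :: cs) none (some (pre.length : Int))).all
            (fun p => !(room_dict.map Prod.fst).contains p ||
              pvRoomTime room_dict p != pvRoomTime room_dict c) = true := by
          rw [hslice]
          refine List.all_eq_true.mpr ?_
          intro p hp
          by_cases h1 : (room_dict.map Prod.fst).contains p = true
          · by_cases h2 : pvRoomTime room_dict p = pvRoomTime room_dict c
            · exact absurd ((hinv _).mpr ⟨p, hp, h1, h2⟩) ht
            · exact Bool.or_eq_true_iff.mpr (Or.inr (bne_iff_ne.mpr h2))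
          · exact Bool.or_eq_true_iff.mpr (Or.inl (by rw [Bool.eq_false_iff.mpr h1]; rfl))
        have ht' : times.contains (pvRoomTime room_dict c) = false :=
          Bool.eq_false_iff.mpr ht
        have hA : pvAStep room_dict s (d, times) c
            = (pvAdd s c d, times ++ [pvRoomTime room_dict c]) := by
          simp only [pvAStep, hc, ht', if_true, if_false, Bool.false_eq_true]
        have hB : pvBStep room_dict s (pre ++ c :: cs) d ((pre.length : Int), c)
            = pvAdd s c d := by
          simp only [pvBStep, hc, hall, Bool.and_self, if_true]
        rw [hA, hB]
        have := ih (pre ++ [c]) (pvAdd s c d) (times ++ [pvRoomTime room_dict c]) (by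
          intro t
          constructor
          · intro hmem
            rcases List.contains_iff_exists_mem_beq.mp hmem with ⟨x, hx, hbeq⟩
            have hxt : t = x := by simpa using hbeq
            rw [← hxt] at hx
            rcases List.mem_append.mp hx with h | h
            · obtain ⟨q, hq, h1, h2⟩ := (hinv t).mp
                (List.contains_iff_exists_mem_beq.mpr ⟨t, h, by simp⟩)
              exact ⟨q, by simp [hq], h1, h2⟩
            · simp at h
              exact ⟨c, by simp, hc, h.symm⟩
          · rintro ⟨q, hq, h1, h2⟩
            rcases List.mem_append.mp hq with h | h
            · have := (hinv t).mpr ⟨q, h, h1, h2⟩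
              rcases List.contains_iff_exists_mem_beq.mp this with ⟨x, hx, hbeq⟩
              exact List.contains_iff_exists_mem_beq.mpr ⟨x, List.mem_append.mpr (Or.inl hx), hbeq⟩
            · simp at h; subst h
              subst h2
              exact List.contains_iff_exists_mem_beq.mpr
                ⟨pvRoomTime room_dict q, by simp, by simp⟩)
        rw [hpp, hlen] at this
        exact this
    · -- class not offered: both skip
      have hc' : (room_dict.map Prod.fst).contains c = false := Bool.eq_false_iff.mpr hc
      have hA : pvAStep room_dict s (d, times) c = (d, times) := by
        simp only [pvAStep, hc', if_false, Bool.false_eq_true]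
      have hB : pvBStep room_dict s (pre ++ c :: cs) d ((pre.length : Int), c) = d := by
        simp only [pvBStep, hc', Bool.false_and, if_false, Bool.false_eq_true]
      rw [hA, hB]
      have := ih (pre ++ [c]) d times (by
        intro t
        rw [hinv t]
        constructor
        · rintro ⟨q, hq, h1, h2⟩; exact ⟨q, by simp [hq], h1, h2⟩
        · rintro ⟨q, hq, h1, h2⟩
          rcases List.mem_append.mp hq with h | h
          · exact ⟨q, h, h1, h2⟩
          · simp at h; subst h; exact absurd h1 hc)
      rw [hpp, hlen] at this
      exact this

-- the two outer folds agree from any accumulator, one student at a time via pv_inner_eq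
theorem pv_outer_eq (room_dict : List (String × List String)) :
    ∀ (l : List (String × List String)) (students : PySem.Dict String (List String)),
    (l.foldl (fun (students : PySem.Dict String (List String)) sp =>
        (sp.2.foldl (pvAStep room_dict sp.1) (students, ([] : List String))).1) students)
    = (l.foldl (fun (students : PySem.Dict String (List String)) sp =>
        (PySem.List.enumerate sp.2 0).foldl (pvBStep room_dict sp.1 sp.2) students) students) := by
  intro l
  induction l with
  | nil => intro students; rfl
  | cons sp rest ih =>
    intro students
    simp only [List.foldl_cons]
    have h := pv_inner_eq room_dict sp.1 sp.2 [] students []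
      (by intro t; simp)
    simp only [List.nil_append, List.length_nil, Int.natCast_zero] at h
    rw [h]
    exact ih _

theorem get_students_in_class_eq_alt (pref_dict room_dict : List (String × List String)) :
    get_students_in_class pref_dict room_dict = get_students_in_class_alt pref_dict room_dict := by
  unfold get_students_in_class get_students_in_class_alt
  exact congrArg PySem.Dict.items (pv_outer_eq room_dict pref_dict PySem.Dict.empty)

-- ===== VERDICT =====
theorem get_students_in_class_spec : Claim_equal_get_students_in_class := by
  intro pref_dict room_dict _ _
  unfold Spec_get_students_in_class
  exact get_students_in_class_eq_alt pref_dict room_dict
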